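-- pv_equiv track=rewrite | github.com/CodeReclaimers/neat-python | neat/nn/__init__.py | feed_forward_layers
-- ===== SOURCE A (Python) =====
-- def required_for_output(inputs, outputs, connections):
--     '''
--     Collect the nodes whose state is required to compute the final network output(s).
--     :param inputs: list of the input identifiers
--     :param outputs: list of the output node identifiers
--     :param connections: list of (input, output) connections in the network.
--     NOTE: It is assumed that the input identifier set and the node identifier set are disjoint.
--     By convention, the output node ids are always the same as the output index.
--
--     Returns a list of layers, with each layer consisting of a set of identifiers.
--     '''
--
--     required = set(outputs)
--     S = set(outputs)
--     while 1:
--         # Find nodes not in S whose output is consumed by a node in S.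
--         T = set(a for (a, b) in connections if b in S and a not in S)
--
--         if not T:
--             break
--
--         layer_nodes = set(x for x in T if x not in inputs)
--         if not layer_nodes:
--             break
--
--         required = required.union(layer_nodes)
--         S = S.union(T)
--
--     return required
--
-- def feed_forward_layers(inputs, outputs, connections):
--     '''
--     Collect the layers whose members can be evaluated in parallel in a feed-forward network.
--     :param inputs: list of the network input nodes
--     :param outputs: list of the output node identifiers
--     :param connections: list of (input, output) connections in the network.
--
--     Returns a list of layers, with each layer consisting of a set of node identifiers.
--     Note that the returned layers do not contain nodes whose output is ultimately
--     never used to compute the final network output.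
--     '''
--
--     required = required_for_output(inputs, outputs, connections)
--
--     layers = []
--     S = set(inputs)
--     while 1:
--         # Find candidate nodes C for the next layer.  These nodes should connect
--         # a node in S to a node not in S.
--         C = set(b for (a, b) in connections if a in S and b not in S)
--         # Keep only the used nodes whose entire input set is contained in S.
--         T = set()
--         for n in C:
--             if n in required and all(a in S for (a, b) in connections if b == n):
--                 T.add(n)
--
--         if not T:
--             break
--
--         layers.append(T)
--         S = S.union(T)
--
--     return layers
-- ===== SOURCE B (Python) =====
-- def feed_forward_layers(inputs, outputs, connections):
--     # Build per-node predecessor lists once; backward frontier BFS for the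
--     # required set; then layer by checking each candidate's whole pred list.
--     preds = {}
--     for a, b in connections:
--         preds.setdefault(b, []).append(a)
--
--     inp = set(inputs)
--
--     # required: frontier-based backward search in rounds, stopping as soon as
--     # a round contributes no non-input node (same round semantics as the spec).
--     required = set(outputs)
--     S = set(outputs)
--     frontier = set(outputs)
--     while frontier:
--         T = {a for n in frontier for a in preds.get(n, ()) if a not in S}
--         layer_nodes = T - inp
--         if not layer_nodes:
--             break
--         required |= layer_nodes
--         S |= T
--         frontier = T
--
--     # layering: a node joins the next layer when it is required, not yet
--     # placed, and every one of its predecessors is already placed.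
--     S = set(inputs)
--     layers = []
--     while True:
--         T = [n for n in preds if n in required and n not in S and all(a in S for a in preds[n])]
--         if not T:
--             break
--         layers.append(set(T))
--         S.update(T)
--     return layers
-- ===== Notes on version B (the rewrite author's own statement) =====
-- stated objective: faster
-- what changed: B builds per-node predecessor lists once and uses them for a frontier-based backward search for the required set and for the layering round (each candidate checked against its own pred list), instead of A's per-round full rescans of all connections with a nested all-connections scan per candidate.
import Mathlib
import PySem

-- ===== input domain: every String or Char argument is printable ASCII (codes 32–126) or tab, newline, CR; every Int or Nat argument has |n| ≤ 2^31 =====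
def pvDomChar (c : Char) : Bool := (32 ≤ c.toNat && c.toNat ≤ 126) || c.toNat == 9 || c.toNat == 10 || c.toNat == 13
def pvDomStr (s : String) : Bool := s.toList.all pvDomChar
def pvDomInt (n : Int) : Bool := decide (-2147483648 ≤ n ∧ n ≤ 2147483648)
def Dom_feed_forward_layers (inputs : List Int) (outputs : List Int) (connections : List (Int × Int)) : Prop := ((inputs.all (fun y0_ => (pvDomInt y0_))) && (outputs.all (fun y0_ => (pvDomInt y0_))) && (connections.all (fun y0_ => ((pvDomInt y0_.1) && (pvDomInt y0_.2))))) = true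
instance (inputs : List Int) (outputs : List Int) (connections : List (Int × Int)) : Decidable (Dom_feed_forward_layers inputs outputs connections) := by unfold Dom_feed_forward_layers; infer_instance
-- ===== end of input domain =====

-- B replaces A's per-round full-connection rescans by per-node predecessor lists built once
-- (frontier-based backward search for `required`, whole-pred-list check for layering); objective: faster.

-- ===== PORT A =====
-- `while 1:` of required_for_output, as fuel recursion; each non-breaking round adds at least one
-- new element of `connections.map (·.1)` to S, so `connections.length + 1` rounds always suffice.
def rfoLoopA (inputs : List Int) (connections : List (Int × Int)) :
    Nat → PySem.Set Int → PySem.Set Int → PySem.Set Int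
  | 0, required, _ => required
  | fuel+1, required, S =>
    -- T = set(a for (a, b) in connections if b in S and a not in S)
    let T : PySem.Set Int := connections.foldl
      (fun t p => if PySem.Set.contains S p.2 && !PySem.Set.contains S p.1 then PySem.Set.add t p.1 else t)
      PySem.Set.empty
    if T = [] then required
    else
      -- layer_nodes = set(x for x in T if x not in inputs)
      let layer_nodes : PySem.Set Int := T.foldl
        (fun t x => if !inputs.contains x then PySem.Set.add t x else t) PySem.Set.empty
      if layer_nodes = [] then required
      else rfoLoopA inputs connections fuel (PySem.Set.union required layer_nodes) (PySem.Set.union S T)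

def required_for_output (inputs : List Int) (outputs : List Int) (connections : List (Int × Int)) : PySem.Set Int :=
  rfoLoopA inputs connections (connections.length + 1) (PySem.Set.ofList outputs) (PySem.Set.ofList outputs)

-- `while 1:` of feed_forward_layers; each non-breaking round adds at least one new element of
-- `connections.map (·.2)` to S, so `connections.length + 1` rounds always suffice.
def fflLoopA (connections : List (Int × Int)) (required : PySem.Set Int) :
    Nat → PySem.Set Int → List (List Int) → List (List Int)
  | 0, _, layers => layers
  | fuel+1, S, layers =>
    -- C = set(b for (a, b) in connections if a in S and b not in S)
    let C : PySem.Set Int := connections.foldl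
      (fun c p => if PySem.Set.contains S p.1 && !PySem.Set.contains S p.2 then PySem.Set.add c p.2 else c)
      PySem.Set.empty
    -- for n in C: if n in required and all(a in S for (a, b) in connections if b == n): T.add(n)
    -- (the filtered generator `all(… if b == n)` is the implication-form `all` below)
    let T : PySem.Set Int := C.foldl
      (fun t n => if PySem.Set.contains required n
                      && connections.all (fun p => !(p.2 == n) || PySem.Set.contains S p.1)
                  then PySem.Set.add t n else t)
      PySem.Set.empty
    if T = [] then layers
    else fflLoopA connections required fuel (PySem.Set.union S T) (layers ++ [T])

def feed_forward_layers (inputs : List Int) (outputs : List Int) (connections : List (Int × Int)) : List (List Int) :=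
  let required := required_for_output inputs outputs connections
  fflLoopA connections required (connections.length + 1) (PySem.Set.ofList inputs) []

-- ===== PORT B =====
-- preds = {}; for a, b in connections: preds.setdefault(b, []).append(a)
def predsDict (connections : List (Int × Int)) : PySem.Dict Int (List Int) :=
  connections.foldl (fun d p => d.modify p.2 [] (fun l => l ++ [p.1])) PySem.Dict.empty

-- B's `while frontier:` loop; fuel as in port A (each non-breaking round grows S).
def rfoLoopB (preds : PySem.Dict Int (List Int)) (inp : PySem.Set Int) :
    Nat → PySem.Set Int → PySem.Set Int → PySem.Set Int → PySem.Set Int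
  | 0, required, _, _ => required
  | fuel+1, required, S, frontier =>
    if frontier = [] then required
    else
      -- T = {a for n in frontier for a in preds.get(n, ()) if a not in S}
      let T : PySem.Set Int := frontier.foldl
        (fun t n => (preds.getD n []).foldl
          (fun t a => if !PySem.Set.contains S a then PySem.Set.add t a else t) t)
        PySem.Set.empty
      let layer_nodes := PySem.Set.diff T inp
      if layer_nodes = [] then required
      else rfoLoopB preds inp fuel (PySem.Set.union required layer_nodes) (PySem.Set.union S T) T

-- B's `while True:` layering loop; fuel as in port A (each non-breaking round grows S).
def fflLoopB (preds : PySem.Dict Int (List Int)) (required : PySem.Set Int) :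
    Nat → PySem.Set Int → List (List Int) → List (List Int)
  | 0, _, layers => layers
  | fuel+1, S, layers =>
    -- T = [n for n in preds if n in required and n not in S and all(a in S for a in preds[n])]
    let T : List Int := (PySem.Dict.keys preds).filter
      (fun n => PySem.Set.contains required n && !PySem.Set.contains S n
                  && (preds.getD n []).all (fun a => PySem.Set.contains S a))
    if T = [] then layers
    else fflLoopB preds required fuel (PySem.Set.update S T) (layers ++ [PySem.Set.ofList T])

def feed_forward_layers_alt (inputs : List Int) (outputs : List Int) (connections : List (Int × Int)) : List (List Int) :=
  let preds := predsDict connections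
  let inp := PySem.Set.ofList inputs
  let required := rfoLoopB preds inp (connections.length + 1)
      (PySem.Set.ofList outputs) (PySem.Set.ofList outputs) (PySem.Set.ofList outputs)
  fflLoopB preds required (connections.length + 1) (PySem.Set.ofList inputs) []

-- ===== PRECONDITION & SPEC =====
def Spec_feed_forward_layers (inputs : List Int) (outputs : List Int) (connections : List (Int × Int)) (out : List (List Int)) : Prop := out = feed_forward_layers_alt inputs outputs connections
instance (inputs : List Int) (outputs : List Int) (connections : List (Int × Int)) (out : List (List Int)) : Decidable (Spec_feed_forward_layers inputs outputs connections out) := by unfold Spec_feed_forward_layers; infer_instance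

-- ===== CLAIM (what is proved, stated in full; the proofs are below) =====
def Claim_equal_feed_forward_layers : Prop := ∀ (inputs : List Int) (outputs : List Int) (connections : List (Int × Int)), Dom_feed_forward_layers inputs outputs connections → Spec_feed_forward_layers inputs outputs connections (feed_forward_layers inputs outputs connections)

-- ===== LEMMAS AND PROOFS =====

theorem mem_foldl_condAdd {α : Type} (f : α → Int) (c : α → Bool) (l : List α) (acc : List Int) (y : Int) :
    y ∈ l.foldl (fun s x => if c x then PySem.Set.add s (f x) else s) acc
      ↔ y ∈ acc ∨ ∃ x ∈ l, c x = true ∧ y = f x := by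
  rw [PySem.List.foldl_if_eq_foldl_filter, ← PySem.Set.update_map_eq_foldl_add, PySem.Set.mem_update]
  simp only [List.mem_map, List.mem_filter]
  constructor
  · rintro (h | ⟨x, ⟨hx, hc⟩, rfl⟩)
    · exact Or.inl h
    · exact Or.inr ⟨x, hx, hc, rfl⟩
  · rintro (h | ⟨x, hx, hc, rfl⟩)
    · exact Or.inl h
    · exact Or.inr ⟨x, ⟨hx, hc⟩, rfl⟩

theorem filter_add_of_neg {P : Int → Bool} {y : Int} (s : List Int) (hP : P y = false) :
    (PySem.Set.add s y).filter P = s.filter P := by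
  unfold PySem.Set.add
  split <;> simp [List.filter_append, hP]

theorem contains_congr (s t : List Int) (h : ∀ x, x ∈ s ↔ x ∈ t) (n : Int) :
    PySem.Set.contains s n = PySem.Set.contains t n := by
  rw [Bool.eq_iff_iff, PySem.Set.contains_iff, PySem.Set.contains_iff]
  exact h n

theorem foldl_condAdd_eq_filter (p : Int → Bool) :
    ∀ (l acc : List Int), (∀ x ∈ l, x ∉ acc) → l.Nodup →
      l.foldl (fun s n => if p n then PySem.Set.add s n else s) acc = acc ++ l.filter p := by
  intro l
  induction l with
  | nil => simp
  | cons n l ih =>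
    intro acc hd hnd
    rcases List.nodup_cons.mp hnd with ⟨hn, hnd'⟩
    rcases hp : p n with _ | _
    · rw [List.foldl_cons, if_neg (by simp [hp]),
        ih acc (fun x hx => hd x (List.mem_cons_of_mem _ hx)) hnd',
        List.filter_cons_of_neg (by simp [hp])]
    · rw [List.foldl_cons, if_pos (by simp [hp]),
        PySem.Set.add_of_not_mem (hd n (List.mem_cons_self ..)),
        ih (acc ++ [n]) (fun x hx => by
          simp only [List.mem_append, List.mem_singleton]
          rintro (h1 | rfl)
          · exact hd x (List.mem_cons_of_mem _ hx) h1
          · exact hn hx) hnd',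
        List.filter_cons_of_pos hp, List.append_assoc, List.singleton_append]

theorem filter_foldl_condAdd {α : Type} (f : α → Int) (c : α → Bool) (P : Int → Bool) :
    ∀ (l : List α) (s t : List Int), (∀ x ∈ l, P (f x) = true → c x = true) → s.filter P = t.filter P →
      (l.foldl (fun s x => if c x then PySem.Set.add s (f x) else s) s).filter P
        = (l.foldl (fun t x => PySem.Set.add t (f x)) t).filter P := by
  intro l
  induction l with
  | nil => intro s t _ h; simpa using h
  | cons x l ih =>
    intro s t hc hst
    simp only [List.foldl_cons]
    apply ih _ _ (fun z hz => hc z (List.mem_cons_of_mem _ hz))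
    rcases hP : P (f x) with _ | _
    · rw [filter_add_of_neg t hP]
      rcases h : c x with _ | _
      · simpa using hst
      · rw [if_pos rfl, filter_add_of_neg s hP]; exact hst
    · rw [if_pos (hc x (List.mem_cons_self ..) hP)]
      have hm : f x ∈ s ↔ f x ∈ t := by
        constructor <;> intro hmem
        · have : f x ∈ t.filter P := hst ▸ List.mem_filter.mpr ⟨hmem, hP⟩
          exact (List.mem_filter.mp this).1
        · have : f x ∈ s.filter P := hst.symm ▸ List.mem_filter.mpr ⟨hmem, hP⟩
          exact (List.mem_filter.mp this).1
      by_cases hms : f x ∈ s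
      · rw [PySem.Set.add_of_mem hms, PySem.Set.add_of_mem (hm.mp hms)]; exact hst
      · rw [PySem.Set.add_of_not_mem hms, PySem.Set.add_of_not_mem (fun h' => hms (hm.mpr h')),
          List.filter_append, List.filter_append, hst]

theorem getD_predsDict (connections : List (Int × Int)) (n : Int) :
    (PySem.Dict.getD (predsDict connections) n [])
      = (connections.filter (fun p => p.2 == n)).map (fun p => p.1) := by
  unfold predsDict
  have h : connections.foldl (fun d p => d.modify p.2 [] (fun l => l ++ [p.1])) PySem.Dict.empty
      = (connections.map (fun p => (p.2, p.1))).foldl (fun d q => d.modify q.1 [] (fun l => l ++ [q.2])) PySem.Dict.empty := by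
    rw [List.foldl_map]
  rw [h, PySem.Dict.getD_foldl_modify_append, List.filter_map]
  simp [Function.comp_def, PySem.Dict.getD_empty]

theorem keys_predsDict (connections : List (Int × Int)) :
    (PySem.Dict.keys (predsDict connections)) = PySem.Set.ofList (connections.map (fun p => p.2)) := by
  unfold predsDict
  rw [PySem.Dict.keys_foldl_modify_key connections (fun p => p.2) [] (fun _ p l => l ++ [p.1]) PySem.Dict.empty]
  simp [PySem.Dict.keys_empty, PySem.Set.update_nil_left]

theorem predsDict_all_eq (connections : List (Int × Int)) (S : PySem.Set Int) (n : Int) :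
    connections.all (fun p => !(p.2 == n) || PySem.Set.contains S p.1)
      = (PySem.Dict.getD (predsDict connections) n []).all (fun a => PySem.Set.contains S a) := by
  rw [Bool.eq_iff_iff, getD_predsDict]
  simp only [List.all_eq_true, List.mem_map, List.mem_filter, Bool.or_eq_true, Bool.not_eq_true',
    beq_iff_eq, beq_eq_false_iff_ne, ne_eq]
  constructor
  · rintro h a ⟨p, ⟨hp, rfl⟩, rfl⟩
    rcases h p hp with h' | h'
    · exact absurd rfl h'
    · exact h'
  · intro h p hp
    by_cases he : p.2 = n
    · exact Or.inr (h p.1 ⟨p, ⟨hp, he⟩, rfl⟩)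
    · exact Or.inl he

theorem mem_TB (preds : PySem.Dict Int (List Int)) (S : PySem.Set Int) (frontier : List Int) :
    ∀ (t0 : List Int) (y : Int),
    y ∈ frontier.foldl
        (fun t n => (preds.getD n []).foldl
          (fun t a => if !PySem.Set.contains S a then PySem.Set.add t a else t) t) t0
      ↔ y ∈ t0 ∨ ∃ n ∈ frontier, y ∈ preds.getD n [] ∧ PySem.Set.contains S y = false := by
  induction frontier with
  | nil => simp
  | cons n ns ih =>
    intro t0 y
    simp only [List.foldl_cons]
    rw [ih]
    rw [mem_foldl_condAdd (fun a => a) (fun a => !PySem.Set.contains S a) (preds.getD n []) t0 y]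
    simp only [List.mem_cons, Bool.not_eq_true']
    constructor
    · rintro ((h | ⟨a, ha, hc, rfl⟩) | ⟨m, hm, h1, h2⟩)
      · exact Or.inl h
      · exact Or.inr ⟨n, Or.inl rfl, ha, hc⟩
      · exact Or.inr ⟨m, Or.inr hm, h1, h2⟩
    · rintro (h | ⟨m, (rfl | hm), h1, h2⟩)
      · exact Or.inl (Or.inl h)
      · exact Or.inl (Or.inr ⟨y, h1, h2, rfl⟩)
      · exact Or.inr ⟨m, hm, h1, h2⟩

theorem roundT_eq (connections : List (Int × Int)) (reqA reqB : PySem.Set Int)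
    (hreq : ∀ x, x ∈ reqA ↔ x ∈ reqB) (S : PySem.Set Int) :
    (connections.foldl
      (fun c p => if PySem.Set.contains S p.1 && !PySem.Set.contains S p.2 then PySem.Set.add c p.2 else c)
      PySem.Set.empty).foldl
      (fun t n => if PySem.Set.contains reqA n
                      && connections.all (fun p => !(p.2 == n) || PySem.Set.contains S p.1)
                  then PySem.Set.add t n else t)
      PySem.Set.empty
    = (PySem.Dict.keys (predsDict connections)).filter
      (fun n => PySem.Set.contains reqB n && !PySem.Set.contains S n
                  && (PySem.Dict.getD (predsDict connections) n []).all (fun a => PySem.Set.contains S a)) := by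
  simp only [show (PySem.Set.empty : PySem.Set Int) = [] from rfl]
  set QA : Int → Bool := fun n => PySem.Set.contains reqA n
      && connections.all (fun p => !(p.2 == n) || PySem.Set.contains S p.1) with hQA
  set P : Int → Bool := fun n => PySem.Set.contains reqB n && !PySem.Set.contains S n
      && (PySem.Dict.getD (predsDict connections) n []).all (fun a => PySem.Set.contains S a) with hPdef
  have hC : connections.foldl
      (fun c p => if PySem.Set.contains S p.1 && !PySem.Set.contains S p.2 then PySem.Set.add c p.2 else c)
      []
      = PySem.Set.ofList ((connections.filter (fun p => PySem.Set.contains S p.1 && !PySem.Set.contains S p.2)).map (fun p => p.2)) := by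
    rw [PySem.List.foldl_if_eq_foldl_filter, ← PySem.Set.update_map_eq_foldl_add,
      PySem.Set.update_nil_left]
  have hCnodup : (connections.foldl
      (fun c p => if PySem.Set.contains S p.1 && !PySem.Set.contains S p.2 then PySem.Set.add c p.2 else c)
      []).Nodup := by
    rw [hC]; exact PySem.Set.nodup_ofList _
  -- T_A = C.filter QA
  rw [foldl_condAdd_eq_filter QA _ [] (fun x _ => List.not_mem_nil) hCnodup, List.nil_append]
  -- C.filter QA = C.filter P
  rw [List.filter_congr (q := P) (by
    intro n hn
    rw [hC] at hn
    rcases List.mem_map.mp ((PySem.Set.mem_ofList _ _).mp hn) with ⟨p, hpf, rfl⟩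
    rcases List.mem_filter.mp hpf with ⟨hp, hcond⟩
    have hSn : PySem.Set.contains S p.2 = false := by
      revert hcond; cases PySem.Set.contains S p.2 <;> simp
    rw [hQA, hPdef]
    simp only [contains_congr reqA reqB hreq, predsDict_all_eq connections S, hSn,
      Bool.not_false, Bool.and_true])]
  -- C.filter P = keys.filter P
  have hstep : (connections.foldl
        (fun c p => if PySem.Set.contains S p.1 && !PySem.Set.contains S p.2 then PySem.Set.add c p.2 else c)
        []).filter P
      = (connections.foldl (fun t p => PySem.Set.add t p.2) []).filter P := by
    apply filter_foldl_condAdd (fun p => p.2) _ P connections [] [] _ rfl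
    intro p hp hP
    rw [hPdef] at hP
    simp only [Bool.and_eq_true, Bool.not_eq_true'] at hP
    rcases hP with ⟨⟨_, hnotS⟩, hall⟩
    have hmem : p.1 ∈ (PySem.Dict.getD (predsDict connections) p.2 []) := by
      rw [getD_predsDict]
      exact List.mem_map.mpr ⟨p, List.mem_filter.mpr ⟨hp, by simp⟩, rfl⟩
    have := List.all_eq_true.mp hall p.1 hmem
    rw [this, hnotS]; rfl
  have hadd : (connections.foldl (fun t p => PySem.Set.add t p.2) [])
      = PySem.Set.ofList (connections.map (fun p => p.2)) := by
    rw [← PySem.Set.update_map_eq_foldl_add, PySem.Set.update_nil_left]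
  rw [hstep, hadd, ← keys_predsDict]

theorem ffl_eq (connections : List (Int × Int)) (reqA reqB : PySem.Set Int)
    (hreq : ∀ x, x ∈ reqA ↔ x ∈ reqB) :
    ∀ (fuel : Nat) (S : PySem.Set Int) (layers : List (List Int)),
      fflLoopA connections reqA fuel S layers = fflLoopB (predsDict connections) reqB fuel S layers := by
  intro fuel
  induction fuel with
  | zero => intro S layers; rfl
  | succ fuel ih =>
    intro S layers
    simp only [fflLoopA, fflLoopB]
    rw [roundT_eq connections reqA reqB hreq S]
    set T := (PySem.Dict.keys (predsDict connections)).filter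
      (fun n => PySem.Set.contains reqB n && !PySem.Set.contains S n
                  && (PySem.Dict.getD (predsDict connections) n []).all (fun a => PySem.Set.contains S a)) with hT
    have hTnodup : T.Nodup := by
      rw [hT]
      exact List.Nodup.filter _ (keys_predsDict connections ▸ PySem.Set.nodup_ofList _)
    by_cases he : T = []
    · rw [if_pos he, if_pos he]
    · rw [if_neg he, if_neg he, PySem.Set.ofList_eq_self_of_nodup T hTnodup,
        show PySem.Set.union S T = PySem.Set.update S T from rfl]
      exact ih _ _

theorem rfo_equiv (inputs : List Int) (connections : List (Int × Int)) :
    ∀ (fuel : Nat) (reqA reqB S_A S_B frontier : PySem.Set Int),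
      (∀ x, x ∈ reqA ↔ x ∈ reqB) → (∀ x, x ∈ S_A ↔ x ∈ S_B) →
      (∀ x ∈ frontier, x ∈ S_B) →
      (∀ p ∈ connections, p.2 ∈ S_B → p.2 ∉ frontier → p.1 ∈ S_B) →
      ∀ y, (y ∈ rfoLoopA inputs connections fuel reqA S_A
              ↔ y ∈ rfoLoopB (predsDict connections) (PySem.Set.ofList inputs) fuel reqB S_B frontier) := by
  intro fuel
  induction fuel with
  | zero => intro _ _ _ _ _ hreq _ _ _ y; exact hreq y
  | succ fuel ih =>
    intro reqA reqB S_A S_B frontier hreq hS hfr hP y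
    simp only [rfoLoopA, rfoLoopB]
    have hTA : ∀ z, z ∈ (connections.foldl
        (fun t p => if PySem.Set.contains S_A p.2 && !PySem.Set.contains S_A p.1 then PySem.Set.add t p.1 else t)
        (PySem.Set.empty : PySem.Set Int))
        ↔ ∃ p ∈ connections, p.2 ∈ S_A ∧ p.1 ∉ S_A ∧ z = p.1 := by
      intro z
      rw [show (PySem.Set.empty : PySem.Set Int) = [] from rfl,
        mem_foldl_condAdd (fun p => p.1) (fun p => PySem.Set.contains S_A p.2 && !PySem.Set.contains S_A p.1) connections [] z]
      simp only [List.not_mem_nil, false_or, Bool.and_eq_true, Bool.not_eq_true', PySem.Set.contains_iff]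
      constructor
      · rintro ⟨p, hp, ⟨h1, h2⟩, rfl⟩
        exact ⟨p, hp, h1, fun hm => by rw [(PySem.Set.contains_iff _ _).mpr hm] at h2; exact (absurd h2 (by simp)), rfl⟩
      · rintro ⟨p, hp, h1, h2, rfl⟩
        refine ⟨p, hp, ⟨h1, ?_⟩, rfl⟩
        cases hc : PySem.Set.contains S_A p.1
        · rfl
        · exact absurd ((PySem.Set.contains_iff _ _).mp hc) h2
    have hTB : ∀ z, z ∈ (frontier.foldl
        (fun t n => ((predsDict connections).getD n []).foldl
          (fun t a => if !PySem.Set.contains S_B a then PySem.Set.add t a else t) t)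
        (PySem.Set.empty : PySem.Set Int))
        ↔ ∃ p ∈ connections, p.2 ∈ frontier ∧ z = p.1 ∧ z ∉ S_B := by
      intro z
      rw [show (PySem.Set.empty : PySem.Set Int) = [] from rfl, mem_TB]
      simp only [List.not_mem_nil, false_or, getD_predsDict, List.mem_map, List.mem_filter, beq_iff_eq]
      constructor
      · rintro ⟨n, hn, ⟨p, ⟨hp, rfl⟩, rfl⟩, hc⟩
        exact ⟨p, hp, hn, rfl, fun hm => by rw [(PySem.Set.contains_iff _ _).mpr hm] at hc; exact (absurd hc (by simp))⟩
      · rintro ⟨p, hp, hn, rfl, hnm⟩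
        refine ⟨p.2, hn, ⟨p, ⟨hp, rfl⟩, rfl⟩, ?_⟩
        cases hc : PySem.Set.contains S_B p.1
        · rfl
        · exact absurd ((PySem.Set.contains_iff _ _).mp hc) hnm
    have hTT : ∀ z, (z ∈ (connections.foldl
        (fun t p => if PySem.Set.contains S_A p.2 && !PySem.Set.contains S_A p.1 then PySem.Set.add t p.1 else t)
        (PySem.Set.empty : PySem.Set Int))
        ↔ z ∈ (frontier.foldl
        (fun t n => ((predsDict connections).getD n []).foldl
          (fun t a => if !PySem.Set.contains S_B a then PySem.Set.add t a else t) t)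
        (PySem.Set.empty : PySem.Set Int))) := by
      intro z
      rw [hTA, hTB]
      constructor
      · rintro ⟨p, hp, h1, h2, rfl⟩
        have h1' : p.2 ∈ S_B := (hS p.2).mp h1
        have h2' : p.1 ∉ S_B := fun hm => h2 ((hS p.1).mpr hm)
        by_cases hfr2 : p.2 ∈ frontier
        · exact ⟨p, hp, hfr2, rfl, h2'⟩
        · exact absurd (hP p hp h1' hfr2) h2'
      · rintro ⟨p, hp, h1, rfl, h2⟩
        exact ⟨p, hp, (hS p.2).mpr (hfr p.2 h1), fun hm => h2 ((hS p.1).mp hm), rfl⟩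
    by_cases hf : frontier = []
    · rw [if_pos hf]
      have hTAe : (connections.foldl
          (fun t p => if PySem.Set.contains S_A p.2 && !PySem.Set.contains S_A p.1 then PySem.Set.add t p.1 else t)
          (PySem.Set.empty : PySem.Set Int)) = [] := by
        rw [List.eq_nil_iff_forall_not_mem]
        intro z hz
        rcases (hTA z).mp hz with ⟨p, hp, h1, h2, rfl⟩
        exact h2 ((hS p.1).mpr (hP p hp ((hS p.2).mp h1) (by rw [hf]; exact List.not_mem_nil)))
      rw [if_pos hTAe]
      exact hreq y
    · rw [if_neg hf]
      by_cases hTAe : (connections.foldl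
          (fun t p => if PySem.Set.contains S_A p.2 && !PySem.Set.contains S_A p.1 then PySem.Set.add t p.1 else t)
          (PySem.Set.empty : PySem.Set Int)) = []
      · rw [if_pos hTAe]
        have hTBe : (frontier.foldl
            (fun t n => ((predsDict connections).getD n []).foldl
              (fun t a => if !PySem.Set.contains S_B a then PySem.Set.add t a else t) t)
            (PySem.Set.empty : PySem.Set Int)) = [] := by
          rw [List.eq_nil_iff_forall_not_mem]
          intro z hz
          exact List.eq_nil_iff_forall_not_mem.mp hTAe z ((hTT z).mpr hz)
        rw [if_pos (by rw [hTBe]; rfl)]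
        exact hreq y
      · rw [if_neg hTAe]
        set TA := (connections.foldl
          (fun t p => if PySem.Set.contains S_A p.2 && !PySem.Set.contains S_A p.1 then PySem.Set.add t p.1 else t)
          (PySem.Set.empty : PySem.Set Int)) with hTAdef
        set TB := (frontier.foldl
          (fun t n => ((predsDict connections).getD n []).foldl
            (fun t a => if !PySem.Set.contains S_B a then PySem.Set.add t a else t) t)
          (PySem.Set.empty : PySem.Set Int)) with hTBdef
        have hlayerA : ∀ z, z ∈ TA.foldl (fun t x => if !inputs.contains x then PySem.Set.add t x else t) (PySem.Set.empty : PySem.Set Int)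
            ↔ z ∈ TA ∧ z ∉ inputs := by
          intro z
          rw [show (PySem.Set.empty : PySem.Set Int) = [] from rfl,
            mem_foldl_condAdd (fun a => a) (fun x => !inputs.contains x) TA [] z]
          simp only [List.not_mem_nil, false_or, Bool.not_eq_true']
          constructor
          · rintro ⟨x, hx, hc, rfl⟩
            exact ⟨hx, fun hm => by rw [List.contains_eq_mem, decide_eq_true hm] at hc; exact (absurd hc (by simp))⟩
          · rintro ⟨hx, hm⟩
            refine ⟨z, hx, ?_, rfl⟩
            rw [List.contains_eq_mem, decide_eq_false hm]
        have hlayerB : ∀ z, z ∈ PySem.Set.diff TB (PySem.Set.ofList inputs) ↔ z ∈ TB ∧ z ∉ inputs := by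
          intro z
          rw [PySem.Set.mem_diff, PySem.Set.mem_ofList]
        have hlayer : ∀ z, (z ∈ TA.foldl (fun t x => if !inputs.contains x then PySem.Set.add t x else t) (PySem.Set.empty : PySem.Set Int)
            ↔ z ∈ PySem.Set.diff TB (PySem.Set.ofList inputs)) := by
          intro z
          rw [hlayerA, hlayerB, hTT]
        by_cases hlA : TA.foldl (fun t x => if !inputs.contains x then PySem.Set.add t x else t) (PySem.Set.empty : PySem.Set Int) = []
        · rw [if_pos hlA]
          rw [if_pos (by
            rw [List.eq_nil_iff_forall_not_mem]
            intro z hz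
            exact List.eq_nil_iff_forall_not_mem.mp hlA z ((hlayer z).mpr hz))]
          exact hreq y
        · rw [if_neg hlA]
          rw [if_neg (by
            intro he
            apply hlA
            rw [List.eq_nil_iff_forall_not_mem]
            intro z hz
            exact List.eq_nil_iff_forall_not_mem.mp he z ((hlayer z).mp hz))]
          apply ih
          · intro x
            rw [PySem.Set.mem_union, PySem.Set.mem_union, hreq x, hlayer x]
          · intro x
            rw [PySem.Set.mem_union, PySem.Set.mem_union, hS x, hTT x]
          · intro x hx
            exact (PySem.Set.mem_union S_B TB x).mpr (Or.inr hx)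
          · intro p hp hmem hnot
            rcases (PySem.Set.mem_union S_B TB p.2).mp hmem with h2 | h2
            · by_cases h1 : p.1 ∈ S_B
              · exact (PySem.Set.mem_union S_B TB p.1).mpr (Or.inl h1)
              · by_cases hfr2 : p.2 ∈ frontier
                · exact (PySem.Set.mem_union S_B TB p.1).mpr (Or.inr ((hTB p.1).mpr ⟨p, hp, hfr2, rfl, h1⟩))
                · exact (PySem.Set.mem_union S_B TB p.1).mpr (Or.inl (hP p hp h2 hfr2))
            · exact absurd h2 hnot

-- ===== VERDICT (by name: the statement is the Claim_ definition above) =====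
theorem feed_forward_layers_spec : Claim_equal_feed_forward_layers := by
  intro inputs outputs connections _
  unfold Spec_feed_forward_layers feed_forward_layers feed_forward_layers_alt required_for_output
  exact ffl_eq connections _ _
    (rfo_equiv inputs connections (connections.length + 1) _ _ _ _ _
      (fun x => Iff.rfl) (fun x => Iff.rfl) (fun x hx => hx) (fun p _ h2 h3 => absurd h2 h3))
    (connections.length + 1) (PySem.Set.ofList inputs) []
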